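-- pv_equiv track=rewrite | github.com/paiml/depyler | examples/hard_moving_average.py | cumulative_average
-- ===== SOURCE A (Python) =====
-- def cumulative_average(data: list[int]) -> list[int]:
--     result: list[int] = []
--     total: int = 0
--     i: int = 0
--     while i < len(data):
--         total = total + data[i]
--         result.append(total // (i + 1))
--         i = i + 1
--     return result
-- ===== SOURCE B (Python) =====
-- def cumulative_average(data: list[int]) -> list[int]:
--     # pass 1: prefix-sum table; pass 2: map division over enumerated table
--     prefix: list[int] = []
--     s = 0
--     for x in data:
--         s = s + x
--         prefix.append(s)
--     return [s // (j + 1) for j, s in enumerate(prefix)]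
-- ===== Notes on version B (the rewrite author's own statement) =====
-- stated objective: alternative
-- what changed: B splits the single interleaved running-sum-and-divide loop into two separate passes: it first builds the full prefix-sum table, then maps floor division over the enumerated table.
import Mathlib
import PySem

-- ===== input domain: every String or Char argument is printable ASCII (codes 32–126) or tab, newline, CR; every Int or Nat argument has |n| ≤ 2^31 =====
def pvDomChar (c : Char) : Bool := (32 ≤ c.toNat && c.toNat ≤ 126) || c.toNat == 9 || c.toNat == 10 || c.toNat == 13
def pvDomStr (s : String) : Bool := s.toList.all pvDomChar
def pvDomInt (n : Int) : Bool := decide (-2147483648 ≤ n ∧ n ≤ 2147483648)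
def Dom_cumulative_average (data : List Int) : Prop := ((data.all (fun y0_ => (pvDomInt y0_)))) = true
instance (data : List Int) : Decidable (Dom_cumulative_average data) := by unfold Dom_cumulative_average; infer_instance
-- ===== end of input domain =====

-- B replaces A's single interleaved running-sum-and-divide loop by two separate passes
-- (build the prefix-sum table, then map floor division over its enumeration); alternative, same cost.

-- ===== PORT A =====
-- A's while loop: index i, running total, result accumulator.
def pvLoopA (data : List Int) (total : Int) (i : Nat) (result : List Int) : List Int :=
  if h : i < data.length then
    pvLoopA data (total + data[i]) (i + 1)
      (result ++ [PySem.Int.floordiv (total + data[i]) ((i : Int) + 1)])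
  else result
termination_by data.length - i

def cumulative_average (data : List Int) : List Int :=
  pvLoopA data 0 0 []

-- ===== PORT B =====
def cumulative_average_alt (data : List Int) : List Int :=
  let pre := (data.foldl (fun (p : List Int × Int) x => (p.1 ++ [p.2 + x], p.2 + x)) ([], 0)).1
  (PySem.List.enumerate pre 0).map (fun js => PySem.Int.floordiv js.2 (js.1 + 1))

-- ===== PRECONDITION & SPEC =====
def Spec_cumulative_average (data : List Int) (out : List Int) : Prop := out = cumulative_average_alt data
instance (data : List Int) (out : List Int) : Decidable (Spec_cumulative_average data out) := by unfold Spec_cumulative_average; infer_instance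

-- ===== CLAIM =====
def Claim_equal_cumulative_average : Prop := ∀ (data : List Int), Dom_cumulative_average data → Spec_cumulative_average data (cumulative_average data)

-- ===== LEMMAS AND PROOFS =====
-- common reference: element-wise averages of the suffix, given running total t and index i
def pvG : List Int → Int → Int → List Int
  | [], _, _ => []
  | x :: xs, t, i => PySem.Int.floordiv (t + x) (i + 1) :: pvG xs (t + x) (i + 1)

def pvPS : List Int → Int → List Int
  | [], _ => []
  | x :: xs, s => (s + x) :: pvPS xs (s + x)

theorem pvLoopA_eq (data : List Int) (i : Nat) (total : Int) (result : List Int) :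
    pvLoopA data total i result = result ++ pvG (data.drop i) total i := by
  rw [pvLoopA]
  split
  · next h =>
    rw [pvLoopA_eq data (i + 1), List.drop_eq_getElem_cons h]
    simp [pvG, Nat.cast_add]
  · next h =>
    rw [List.drop_of_length_le (by omega)]
    simp [pvG]
termination_by data.length - i

theorem pvFold_eq (xs : List Int) (acc : List Int) (s : Int) :
    (xs.foldl (fun (p : List Int × Int) x => (p.1 ++ [p.2 + x], p.2 + x)) (acc, s)).1
      = acc ++ pvPS xs s := by
  induction xs generalizing acc s with
  | nil => simp [pvPS]
  | cons x xs ih => simp [List.foldl_cons, ih, pvPS]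

theorem pvEnum_eq (xs : List Int) (t : Int) (i : Int) :
    (PySem.List.enumerate (pvPS xs t) i).map (fun js => PySem.Int.floordiv js.2 (js.1 + 1))
      = pvG xs t i := by
  induction xs generalizing t i with
  | nil => simp [pvPS, pvG, PySem.List.enumerate_nil]
  | cons x xs ih => simp [pvPS, pvG, PySem.List.enumerate_cons, ih]

-- ===== VERDICT =====
theorem cumulative_average_spec : Claim_equal_cumulative_average := by
  intro data _
  show cumulative_average data = cumulative_average_alt data
  rw [cumulative_average, cumulative_average_alt, pvLoopA_eq]
  simp only [List.drop_zero, List.nil_append]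
  rw [pvFold_eq, List.nil_append, pvEnum_eq]
  simp only [Nat.cast_zero]
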